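-- pv_equiv track=rewrite | github.com/laycrojj/aoc23 | python/3/solution_3_1.py | get_numbers_in_line
-- ===== SOURCE A (Python) =====
-- NUMBERS: list = [ str(x) for x in range(10) ]
--
-- def get_number_length(line_portion: list) -> int:
--     """ Get the Length of the current number in the line """
--
--     number_length = 1
--
--     for character in line_portion:
--         if character in NUMBERS:
--             number_length += 1
--         else:
--             return number_length
--
--     return number_length
--
-- def get_numbers_in_line(line: str) -> list:
--     """ Return a List of Tuples containing the start index
--     and length of the number on the line """
--
--     line_numbers: list = []
--
--     number_end = 0
--
--     for index, character in enumerate(line):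
--         if index >= number_end and character in NUMBERS:
--             start = index
--             length = get_number_length(line[index + 1::])
--             line_numbers.append((start,length))
--             number_end = index + length
--
--     return line_numbers
-- ===== SOURCE B (Python) =====
-- def get_numbers_in_line(line: str) -> list:
--     """ Return a List of Tuples containing the start index
--     and length of the number on the line """
--
--     line_numbers = []
--     i = 0
--     n = len(line)
--     while i < n:
--         ch = line[i]
--         if '0' <= ch <= '9':
--             j = i + 1
--             while j < n and '0' <= line[j] <= '9':
--                 j += 1
--             line_numbers.append((i, j - i))
--             i = j
--         else:
--             i += 1
--     return line_numbers
-- ===== Notes on version B (the rewrite author's own statement) =====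
-- stated objective: alternative
-- what changed: replaced the per-index membership test plus a fresh tail slice and helper rescan at every number start with one linear two-pointer scan that advances past each digit run it measures, so no slices are built; intended as faster (measured ~1.7x at the largest size but not consistently >=1.5x per input)
import Mathlib
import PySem

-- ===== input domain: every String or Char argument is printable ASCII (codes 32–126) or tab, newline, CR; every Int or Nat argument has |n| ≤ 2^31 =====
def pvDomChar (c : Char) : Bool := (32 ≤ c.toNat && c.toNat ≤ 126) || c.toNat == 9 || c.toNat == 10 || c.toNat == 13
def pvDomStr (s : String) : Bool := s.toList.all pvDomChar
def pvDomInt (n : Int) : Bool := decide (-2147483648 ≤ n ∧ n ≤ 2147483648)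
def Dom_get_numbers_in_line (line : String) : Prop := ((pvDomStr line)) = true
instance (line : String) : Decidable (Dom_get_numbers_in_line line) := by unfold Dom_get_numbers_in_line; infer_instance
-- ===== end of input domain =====

-- B replaces A's per-start tail slicing + helper rescan with one linear two-pointer scan (intended as faster; measured ~1.7x median at the largest size, not consistent per input).


-- ===== PORT A =====
-- NUMBERS = [str(x) for x in range(10)]
def pvNUMBERS : List String := (PySem.List.pyRange 0 10 1).map PySem.Int.toStr

-- loop body of get_number_length: number_length starts at 1, +1 per leading digit, return at first non-digit
def pvGnlAux : List Char → Int → Int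
  | [], acc => acc
  | c :: rest, acc => if String.ofList [c] ∈ pvNUMBERS then pvGnlAux rest (acc + 1) else acc

def pv_get_number_length (line_portion : List Char) : Int := pvGnlAux line_portion 1

-- body of A's for-loop over enumerate(line); state = (number_end, line_numbers)
def pvStepA (cs : List Char) (st : Int × List (Int × Int)) (ic : Int × Char) :
    Int × List (Int × Int) :=
  if ic.1 ≥ st.1 ∧ String.ofList [ic.2] ∈ pvNUMBERS then
    let start := ic.1
    -- line[index + 1::] — slice with omitted stop
    let length := pv_get_number_length (PySem.List.slice cs (some (ic.1 + 1)) none)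
    (start + length, st.2 ++ [(start, length)])
  else st

def get_numbers_in_line (line : String) : List (Int × Int) :=
  ((PySem.List.enumerate line.toList 0).foldl (pvStepA line.toList) (0, [])).2

-- ===== PORT B =====
-- inner while loop of B: number of leading digits of the remaining characters
def pvRun : List Char → Nat
  | [] => 0
  | c :: rest => if '0' ≤ c ∧ c ≤ '9' then pvRun rest + 1 else 0

-- outer while loop of B: i is the current position, cs the characters from position i on
def pvBGo : List Char → Nat → List (Int × Int)
  | [], _ => []
  | c :: rest, i =>
    if '0' ≤ c ∧ c ≤ '9' then
      let k := 1 + pvRun rest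
      ((i : Int), (k : Int)) :: pvBGo (rest.drop (k - 1)) (i + k)
    else pvBGo rest (i + 1)
  termination_by cs _ => cs.length
  decreasing_by
    · simp [List.length_drop]
    · simp

def get_numbers_in_line_alt (line : String) : List (Int × Int) := pvBGo line.toList 0

-- ===== PRECONDITION & SPEC =====
def Spec_get_numbers_in_line (line : String) (out : List (Int × Int)) : Prop := out = get_numbers_in_line_alt line
instance (line : String) (out : List (Int × Int)) : Decidable (Spec_get_numbers_in_line line out) := by unfold Spec_get_numbers_in_line; infer_instance

-- ===== CLAIM (what is proved, stated in full; the proofs are below) =====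
def Claim_equal_get_numbers_in_line : Prop := ∀ (line : String), Dom_get_numbers_in_line line → Spec_get_numbers_in_line line (get_numbers_in_line line)

-- ===== LEMMAS AND PROOFS =====

lemma pv_char_eq_iff (c d : Char) : c = d ↔ c.toNat = d.toNat :=
  ⟨fun h => h ▸ rfl, fun h => Char.ext (UInt32.toNat_inj.mp h)⟩

lemma pv_char_le_iff (c d : Char) : c ≤ d ↔ c.toNat ≤ d.toNat :=
  ⟨fun h => UInt32.le_iff_toNat_le.mp h, fun h => UInt32.le_iff_toNat_le.mpr h⟩

-- A's digit test (membership of the 1-char string in NUMBERS) agrees with B's char comparison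
lemma pvMemNumbers (c : Char) : (String.ofList [c] ∈ pvNUMBERS) ↔ ('0' ≤ c ∧ c ≤ '9') := by
  have h : pvNUMBERS = [String.ofList ['0'], String.ofList ['1'], String.ofList ['2'],
      String.ofList ['3'], String.ofList ['4'], String.ofList ['5'], String.ofList ['6'],
      String.ofList ['7'], String.ofList ['8'], String.ofList ['9']] := by decide
  rw [h]
  simp only [List.mem_cons, List.not_mem_nil, or_false, String.ofList_inj, List.cons.injEq,
    and_true]
  rw [pv_char_eq_iff c '0', pv_char_eq_iff c '1', pv_char_eq_iff c '2', pv_char_eq_iff c '3',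
    pv_char_eq_iff c '4', pv_char_eq_iff c '5', pv_char_eq_iff c '6', pv_char_eq_iff c '7',
    pv_char_eq_iff c '8', pv_char_eq_iff c '9', pv_char_le_iff '0' c, pv_char_le_iff c '9']
  simp only [show ('0' : Char).toNat = 48 from rfl, show ('1' : Char).toNat = 49 from rfl,
    show ('2' : Char).toNat = 50 from rfl, show ('3' : Char).toNat = 51 from rfl,
    show ('4' : Char).toNat = 52 from rfl, show ('5' : Char).toNat = 53 from rfl,
    show ('6' : Char).toNat = 54 from rfl, show ('7' : Char).toNat = 55 from rfl,
    show ('8' : Char).toNat = 56 from rfl, show ('9' : Char).toNat = 57 from rfl]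
  omega

-- A's helper computes 1 + (number of leading digits), B's inner loop counts the run
lemma pvGnlAux_eq (cs : List Char) : ∀ acc : Int, pvGnlAux cs acc = acc + (pvRun cs : Int) := by
  induction cs with
  | nil => intro acc; simp [pvGnlAux, pvRun]
  | cons c rest ih =>
    intro acc
    by_cases hd : ('0' ≤ c ∧ c ≤ '9')
    · rw [pvGnlAux, if_pos ((pvMemNumbers c).mpr hd), pvRun, if_pos hd, ih]
      push_cast; ring
    · rw [pvGnlAux, if_neg (fun h => hd ((pvMemNumbers c).mp h)), pvRun, if_neg hd]
      simp

-- indices below number_end are skipped by A's loop, whatever they hold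
lemma pvSkip (full : List Char) (m : Nat) : ∀ (cs : List Char) (n : Nat)
    (st : Int × List (Int × Int)), (n : Int) + m ≤ st.1 →
    (PySem.List.enumerate cs (n : Int)).foldl (pvStepA full) st =
    (PySem.List.enumerate (cs.drop m) ((n + m : Nat) : Int)).foldl (pvStepA full) st := by
  induction m with
  | zero => intro cs n st _; simp
  | succ m ih =>
    intro cs n st hle
    cases cs with
    | nil => simp [PySem.List.enumerate_nil]
    | cons c rest =>
      rw [PySem.List.enumerate_cons, List.foldl_cons]
      have hcond : ¬ ((n : Int) ≥ st.1 ∧ String.ofList [c] ∈ pvNUMBERS) := by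
        rintro ⟨h1, -⟩; push_cast at hle; omega
      rw [pvStepA, if_neg hcond]
      have hrec := ih rest (n + 1) st (by push_cast; push_cast at hle; omega)
      rw [show ((n + 1 : Nat) : Int) = (n : Int) + 1 by push_cast; ring] at hrec
      rw [hrec, show ((n + 1 + m : Nat) : Int) = ((n + (m + 1) : Nat) : Int) by push_cast; ring,
        show (c :: rest).drop (m + 1) = rest.drop m from rfl]

lemma pvMain (full : List Char) : ∀ (fuel : Nat) (cs : List Char) (n : Nat) (ne : Int)
    (acc : List (Int × Int)), cs.length ≤ fuel → full.drop n = cs → ne ≤ (n : Int) →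
    ((PySem.List.enumerate cs ((n : Nat) : Int)).foldl (pvStepA full) (ne, acc)).2 =
      acc ++ pvBGo cs n := by
  intro fuel
  induction fuel with
  | zero =>
    intro cs n ne acc hlen _ _
    cases cs with
    | nil => simp [pvBGo]
    | cons c rest => simp at hlen
  | succ fuel ih =>
    intro cs n ne acc hlen hdrop hne
    cases cs with
    | nil => simp [pvBGo]
    | cons c rest =>
      rw [PySem.List.enumerate_cons, List.foldl_cons]
      have hrest : full.drop (n + 1) = rest := by
        have h2 := congrArg List.tail hdrop
        rwa [List.tail_drop] at h2
      by_cases hd : ('0' ≤ c ∧ c ≤ '9')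
      · -- digit: A emits (n, 1 + run rest) and sets number_end = n + that length
        have hcond : ((n : Int) ≥ ne ∧ String.ofList [c] ∈ pvNUMBERS) :=
          ⟨hne, (pvMemNumbers c).mpr hd⟩
        rw [pvStepA, if_pos hcond]
        have hslice : PySem.List.slice full (some ((n : Int) + 1)) none = rest := by
          rw [show ((n : Int) + 1) = ((n + 1 : Nat) : Int) by push_cast; ring,
            PySem.List.slice_from_natCast, hrest]
        set r := pvRun rest with hr
        have hlen2 : pv_get_number_length (PySem.List.slice full (some ((n : Int) + 1)) none)
            = 1 + (r : Int) := by
          rw [hslice, pv_get_number_length, pvGnlAux_eq]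
        simp only [hlen2]
        have hskip := pvSkip full r rest (n + 1)
          ((n : Int) + (1 + (r : Int)), acc ++ [((n : Int), 1 + (r : Int))])
          (by push_cast; omega)
        rw [show ((n + 1 : Nat) : Int) = (n : Int) + 1 by push_cast; ring] at hskip
        have hdroprest : full.drop (n + 1 + r) = rest.drop r := by
          have h3 := congrArg (List.drop r) hrest
          rwa [List.drop_drop] at h3
        have hrec := ih (rest.drop r) (n + 1 + r) ((n : Int) + (1 + (r : Int)))
          (acc ++ [((n : Int), 1 + (r : Int))])
          (by have := List.length_drop (l := rest) (i := r); simp at hlen ⊢; omega)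
          hdroprest (by push_cast; omega)
        rw [hskip, hrec, pvBGo, if_pos hd]
        show acc ++ [((n : Int), 1 + (r : Int))] ++ pvBGo (rest.drop r) (n + 1 + r) =
          acc ++ (((n : Int), ((1 + pvRun rest : Nat) : Int)) ::
            pvBGo (rest.drop (1 + pvRun rest - 1)) (n + (1 + pvRun rest)))
        rw [List.append_assoc, ← hr, show 1 + r - 1 = r from by omega,
          show n + (1 + r) = n + 1 + r from by omega,
          show ((1 + r : Nat) : Int) = 1 + (r : Int) from by push_cast; ring,
          List.singleton_append]
      · -- non-digit: A's condition is false, both loops step to the next index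
        have hcond : ¬ ((n : Int) ≥ ne ∧ String.ofList [c] ∈ pvNUMBERS) := by
          rintro ⟨-, h2⟩; exact hd ((pvMemNumbers c).mp h2)
        rw [pvStepA, if_neg hcond]
        have hrec := ih rest (n + 1) ne acc (by simp at hlen; omega) hrest
          (by push_cast; omega)
        rw [show ((n + 1 : Nat) : Int) = (n : Int) + 1 by push_cast; ring] at hrec
        rw [hrec, pvBGo, if_neg hd]

-- ===== VERDICT (by name: the statement is the Claim_ definition above) =====
theorem get_numbers_in_line_spec : Claim_equal_get_numbers_in_line := by
  intro line _
  unfold Spec_get_numbers_in_line get_numbers_in_line get_numbers_in_line_alt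
  have := pvMain line.toList line.toList.length line.toList 0 0 [] (le_refl _) rfl (by simp)
  simpa using this
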